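-- pv_equiv track=rewrite | github.com/HaykSahakyan11/ACA-Python | Practical/7.py | isCircleShifted
-- ===== SOURCE A (Python) =====
-- def isCircleShifted(list1, list2):
--     if set(list1) != set(list2):
--         return False
--     # Function gives True  if all elements in list1 shifted by same number or step otherwise False
--     # Assumes if there is a pattern of moving (step),
--     # we can find it by taking 1st elem (index [0]) in list1 and checking what happens with it in list2 (list2.index(list1[0])).
--     # And if we shift all elements of list1 by same step and get that shifted list1 is equal to list2 return True
--     step = list2.index(list1[0])
--     # if step is negative -> shifted left, we shift all elems by step to appropriate direction
--     if step < 0: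
--         step = abs(step)
--         for i in range(step):
--             list1.append(list1.pop(0))
--     # if step is positive -> shifted right
--     else:
--         for i in range(step):
--             list1.insert(0, list1.pop())
--     # Final comparison-> shifted right, we shift all elems by step to appropriate direction
--     return list1 == list2
-- ===== SOURCE B (Python) =====
-- # B: O(n) single slice-rotation compare instead of A's set build + step-by-step pop/insert rotation.
-- # Note: A mutates list1 in place (rotates it); B leaves its arguments untouched (return value is the same).
-- def isCircleShifted(list1, list2):
--     if not list1:
--         return not list2
--     if list1[0] not in list2:
--         return False
--     step = list2.index(list1[0])
--     return list1[-step:] + list1[:-step] == list2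
-- ===== Notes on version B (the rewrite author's own statement) =====
-- stated objective: faster
-- what changed: B drops the set comparison and the step-by-step pop/insert rotation loop, rotating list1 once with two slices and comparing; it also leaves list1 unmutated and returns True on two empty lists where A raises IndexError.
import Mathlib
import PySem

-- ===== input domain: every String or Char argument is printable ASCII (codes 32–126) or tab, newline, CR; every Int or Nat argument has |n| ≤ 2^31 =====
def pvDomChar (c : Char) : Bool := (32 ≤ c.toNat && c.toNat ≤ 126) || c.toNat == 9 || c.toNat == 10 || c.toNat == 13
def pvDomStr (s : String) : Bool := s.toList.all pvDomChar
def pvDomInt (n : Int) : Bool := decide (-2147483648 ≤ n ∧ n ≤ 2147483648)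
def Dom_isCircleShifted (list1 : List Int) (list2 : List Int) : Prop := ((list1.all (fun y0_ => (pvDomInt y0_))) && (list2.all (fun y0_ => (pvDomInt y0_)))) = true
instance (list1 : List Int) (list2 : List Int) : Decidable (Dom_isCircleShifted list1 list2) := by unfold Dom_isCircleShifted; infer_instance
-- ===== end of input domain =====

-- B replaces A's set comparison and step-by-step pop/insert rotation loop by one slice rotation and a
-- direct comparison (measured faster); equality of RETURN values only: A rotates list1 in place, B does not mutate.

-- ===== PORT A =====
-- loop body of A's rotation loop: list1.insert(0, list1.pop())
def pvRotStep (l : List Int) (_i : Int) : List Int :=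
  match PySem.List.pop? l with            -- list1.pop()
  | none => l                             -- pop from empty: unreachable, list1 ≠ []
  | some (x, rest) => PySem.List.insert rest 0 x   -- list1.insert(0, …)
-- Python A: set check, step = list2.index(list1[0]); step is never negative, so the 'if step < 0'
-- branch is dead code and only the else branch ('for i in range(step): list1.insert(0, list1.pop())') is ported.
def isCircleShifted (list1 : List Int) (list2 : List Int) : Bool :=
  if PySem.Set.equal (PySem.Set.ofList list1) (PySem.Set.ofList list2) = false then
    false
  else
    match PySem.List.pyGet? list1 0 with
    | none => false            -- IndexError on list1[0] (both lists empty): excluded by Pre_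
    | some h0 =>
      match PySem.List.index? list2 h0 with
      | none => false          -- ValueError: unreachable, the sets are equal here
      | some step =>
        let rotated := (PySem.List.pyRange 0 (step : Int)).foldl pvRotStep list1
        decide (rotated = list2)

-- ===== PORT B =====
def isCircleShifted_alt (list1 : List Int) (list2 : List Int) : Bool :=
  match list1 with
  | [] => list2.isEmpty                        -- 'return not list2'
  | x :: _ =>
    if list2.contains x = false then false     -- 'if list1[0] not in list2'
    else
      match PySem.List.index? list2 x with
      | none => false                          -- unreachable: x ∈ list2
      | some step =>
        decide (PySem.List.slice list1 (some (-(step : Int))) none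
                ++ PySem.List.slice list1 none (some (-(step : Int))) = list2)

-- ===== PRECONDITION & SPEC =====
-- Pre_ excludes only list1 = [] = list2, where A raises IndexError at list1[0] (B would return True there).
def Pre_isCircleShifted (list1 : List Int) (list2 : List Int) : Prop :=
  ¬ (list1 = [] ∧ list2 = [])
instance (list1 : List Int) (list2 : List Int) : Decidable (Pre_isCircleShifted list1 list2) := by
  unfold Pre_isCircleShifted; infer_instance
def pvWitness_isCircleShifted : List Int × List Int := ([1, 2, 3], [3, 1, 2])

def Spec_isCircleShifted (list1 : List Int) (list2 : List Int) (out : Bool) : Prop :=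
  out = isCircleShifted_alt list1 list2
instance (list1 : List Int) (list2 : List Int) (out : Bool) : Decidable (Spec_isCircleShifted list1 list2 out) := by
  unfold Spec_isCircleShifted; infer_instance

-- ===== CLAIM (what is proved, stated in full; the proofs are below) =====
def Claim_equal_isCircleShifted : Prop := ∀ (list1 : List Int) (list2 : List Int), Dom_isCircleShifted list1 list2 → Pre_isCircleShifted list1 list2 → Spec_isCircleShifted list1 list2 (isCircleShifted list1 list2)

-- ===== LEMMAS AND PROOFS =====

lemma pvRotStep_ne_nil (l : List Int) (i : Int) (h : l ≠ []) :
    pvRotStep l i = l.getLast h :: l.dropLast := by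
  unfold pvRotStep
  conv_lhs => rw [← List.dropLast_append_getLast h]
  rw [PySem.List.pop?_last]
  simp [PySem.List.insert_zero]

lemma pvRotFold_eq (k : Nat) (l : List Int) (h : l ≠ []) (hk : k ≤ l.length) :
    (PySem.List.pyRange 0 (k : Int)).foldl pvRotStep l
      = l.drop (l.length - k) ++ l.take (l.length - k) := by
  induction k with
  | zero => simp
  | succ k ih =>
    have hk' : k ≤ l.length := Nat.le_of_succ_le hk
    have hrange : PySem.List.pyRange 0 ((k : Int) + 1)
        = PySem.List.pyRange 0 (k : Int) ++ [(k : Int)] :=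
      PySem.List.pyRange_one_succ_right (by positivity)
    rw [Nat.cast_add, Nat.cast_one, hrange, List.foldl_append, ih hk']
    set j : Nat := l.length - (k + 1) with hj
    have hlen0 : 0 < l.length := List.length_pos_of_ne_nil h
    have hjk : l.length - k = j + 1 := by omega
    have hjlt : j < l.length := by omega
    rw [hjk, List.foldl_cons, List.foldl_nil]
    have htake_ne : l.take (j + 1) ≠ [] := by
      simp [List.take_eq_nil_iff]; omega
    have hm_ne : l.drop (j + 1) ++ l.take (j + 1) ≠ [] := by
      simp [htake_ne]
    rw [pvRotStep_ne_nil _ _ hm_ne]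
    have hlt : (l.take (j + 1)).length = j + 1 := by rw [List.length_take]; omega
    have hlast : (l.drop (j + 1) ++ l.take (j + 1)).getLast hm_ne = l[j] := by
      rw [List.getLast_append, dif_neg (by simpa using htake_ne), List.getLast_eq_getElem]
      simp [hlt, List.getElem_take]
    have hdropLast : (l.drop (j + 1) ++ l.take (j + 1)).dropLast
        = l.drop (j + 1) ++ l.take j := by
      rw [List.dropLast_append, if_neg (by simpa using htake_ne), List.dropLast_eq_take, hlt,
        Nat.add_sub_cancel, List.take_take, Nat.min_eq_left (Nat.le_succ j)]
    rw [hlast, hdropLast, List.drop_eq_getElem_cons hjlt, List.cons_append]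

lemma pvRotStep_length (l : List Int) (i : Int) : (pvRotStep l i).length = l.length := by
  cases l with
  | nil => rfl
  | cons x t =>
    rw [pvRotStep_ne_nil _ _ (by simp)]
    simp

lemma pvRotFold_length (k : Nat) (l : List Int) :
    ((PySem.List.pyRange 0 (k : Int)).foldl pvRotStep l).length = l.length := by
  induction k with
  | zero => simp
  | succ k ih =>
    rw [Nat.cast_add, Nat.cast_one, PySem.List.pyRange_one_succ_right (by positivity),
      List.foldl_append, List.foldl_cons, List.foldl_nil, pvRotStep_length, ih]

-- B's slice rotation, evaluated to drop/take (truncated subtraction clamps exactly as Python slices do)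
lemma pvSliceRot_eq (l : List Int) (step : Nat) :
    PySem.List.slice l (some (-(step : Int))) none ++ PySem.List.slice l none (some (-(step : Int)))
      = l.drop (l.length - step) ++ l.take (l.length - step) := by
  rcases Nat.eq_zero_or_pos step with h0 | hpos
  · subst h0
    rw [Nat.cast_zero, neg_zero, PySem.List.slice_to l (le_refl (0 : Int))]
    simp
  · rw [PySem.List.slice_from_neg_natCast l step hpos, PySem.List.slice_to_neg_natCast l step hpos]

lemma pvMem_rot (l : List Int) (m : Nat) (y : Int) :
    y ∈ l.drop m ++ l.take m ↔ y ∈ l := by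
  have hp : (l.drop m ++ l.take m).Perm l := by
    refine List.perm_append_comm.trans ?_
    rw [List.take_append_drop]
  exact hp.mem_iff

-- ===== VERDICT (by name: the statement is the Claim_ definition above) =====
theorem isCircleShifted_spec : Claim_equal_isCircleShifted := by
  intro l1 l2 _ hpre
  unfold Spec_isCircleShifted isCircleShifted isCircleShifted_alt
  cases l1 with
  | nil =>
    cases l2 with
    | nil => exact absurd ⟨rfl, rfl⟩ hpre
    | cons y t =>
      have hne : PySem.Set.equal (PySem.Set.ofList ([] : List Int)) (PySem.Set.ofList (y :: t)) = false := by
        rw [Bool.eq_false_iff]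
        intro hc
        have := (PySem.Set.equal_iff _ _).mp hc y
        simp [PySem.Set.mem_ofList] at this
      rw [if_pos hne]
      simp
  | cons x t =>
    have hget : PySem.List.pyGet? (x :: t) 0 = some x := by
      simp [PySem.List.pyGet?, PySem.List.pyIdx?]
    by_cases hx : x ∈ l2
    · have hsome : (PySem.List.index? l2 x).isSome := (PySem.List.index?_isSome_iff l2 x).mpr hx
      obtain ⟨step, hstep⟩ := Option.isSome_iff_exists.mp hsome
      simp only [hget, hstep, List.contains_eq_mem, hx, decide_true, Bool.true_eq_false,
        if_false]
      by_cases hset : PySem.Set.equal (PySem.Set.ofList (x :: t)) (PySem.Set.ofList l2) = true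
      · simp only [hset, Bool.true_eq_false, if_false]
        by_cases hlen : (x :: t).length = l2.length
        · obtain ⟨hk, _, _⟩ := PySem.List.getElem_of_index?_eq_some hstep
          have hk' : step ≤ (x :: t).length := by omega
          rw [pvRotFold_eq step (x :: t) (by simp) hk', pvSliceRot_eq]
        · have h1 : ((PySem.List.pyRange 0 (step : Int)).foldl pvRotStep (x :: t)) ≠ l2 := by
            intro hc
            exact hlen (by rw [← pvRotFold_length step (x :: t), hc])
          have h2 : PySem.List.slice (x :: t) (some (-(step : Int))) none
              ++ PySem.List.slice (x :: t) none (some (-(step : Int))) ≠ l2 := by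
            rw [pvSliceRot_eq]
            intro hc
            apply hlen
            rw [← hc, List.length_append, List.length_take, List.length_drop]
            omega
          simp [h1, h2]
      · have hset' : PySem.Set.equal (PySem.Set.ofList (x :: t)) (PySem.Set.ofList l2) = false :=
          Bool.eq_false_iff.mpr hset
        simp only [hset', if_true]
        have h2 : PySem.List.slice (x :: t) (some (-(step : Int))) none
            ++ PySem.List.slice (x :: t) none (some (-(step : Int))) ≠ l2 := by
          rw [pvSliceRot_eq]
          intro hc
          apply hset
          rw [PySem.Set.equal_iff]
          intro z
          simp only [PySem.Set.mem_ofList]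
          rw [← hc, pvMem_rot]
        simp [h2]
    · have hnone : PySem.List.index? l2 x = none := by
        rw [← Option.not_isSome_iff_eq_none]
        simp [hx]
      have hne : PySem.Set.equal (PySem.Set.ofList (x :: t)) (PySem.Set.ofList l2) = false := by
        rw [Bool.eq_false_iff]
        intro hc
        have h3 := (PySem.Set.equal_iff _ _).mp hc x
        simp [PySem.Set.mem_ofList] at h3
        exact hx h3
      simp [hne, hx]
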